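-- pv_equiv track=rewrite | github.com/unfinishablemap/unfinishablemap | tools/sync/redirects.py | _flatten_chains
-- ===== SOURCE A (Python) =====
-- def _flatten_chains(redirect_map: dict[str, str]) -> dict[str, str]:
--     """
--     Flatten redirect chains so every source points directly to the final target.
--
--     If A → B and B → C, rewrites A → C.
--     """
--     flattened: dict[str, str] = {}
--     for source, target in redirect_map.items():
--         visited: set[str] = {source}
--         final = target
--         while final in redirect_map:
--             if final in visited:
--                 break  # cycle guard
--             visited.add(final)
--             final = redirect_map[final]
--         flattened[source] = final
--     return flattened
-- ===== SOURCE B (Python) =====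
-- def _flatten_chains(redirect_map: dict[str, str]) -> dict[str, str]:
--     """
--     Flatten redirect chains so every source points directly to the final target.
--
--     Memoized functional-graph traversal: each node is resolved once; a chain is
--     walked only until it reaches a non-key, an already-resolved node, or a node
--     on the current walk (a cycle: cycle nodes resolve to themselves, the tail
--     resolves to the cycle entry point).
--     """
--     memo: dict[str, str] = {}
--     for start in redirect_map:
--         if start in memo:
--             continue
--         path: list[str] = []
--         on_path: set[str] = set()
--         cur = start
--         while cur in redirect_map and cur not in memo and cur not in on_path:
--             on_path.add(cur)
--             path.append(cur)
--             cur = redirect_map[cur]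
--         if cur in on_path:
--             i = path.index(cur)
--             for node in path[:i]:
--                 memo[node] = cur
--             for node in path[i:]:
--                 memo[node] = node
--         else:
--             final = memo.get(cur, cur)
--             for node in path:
--                 memo[node] = final
--     return {source: memo[source] for source in redirect_map}
-- ===== Notes on version B (the rewrite author's own statement) =====
-- stated objective: alternative
-- what changed: Replaces A's independent visited-set chain walk per source with a single memoized traversal of the redirect graph: each node is resolved exactly once (cycle nodes to themselves, tail nodes to the cycle entry), so shared chain suffixes are never re-walked; asymptotically better on long shared chains, but not measurably faster on the generated inputs.
import Mathlib
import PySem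

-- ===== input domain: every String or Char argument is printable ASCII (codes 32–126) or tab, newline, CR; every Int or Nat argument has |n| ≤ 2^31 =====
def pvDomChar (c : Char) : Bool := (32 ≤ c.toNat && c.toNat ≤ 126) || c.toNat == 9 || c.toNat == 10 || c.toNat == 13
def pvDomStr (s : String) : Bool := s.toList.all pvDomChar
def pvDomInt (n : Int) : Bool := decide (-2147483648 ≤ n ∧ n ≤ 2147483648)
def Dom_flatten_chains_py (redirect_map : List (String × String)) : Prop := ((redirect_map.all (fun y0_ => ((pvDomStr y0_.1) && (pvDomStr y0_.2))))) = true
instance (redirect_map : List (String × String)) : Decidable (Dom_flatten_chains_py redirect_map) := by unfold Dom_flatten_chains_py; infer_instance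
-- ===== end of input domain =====

-- B replaces A's per-source chain walk by a single memoized traversal of the redirect graph
-- (each node resolved once: cycle nodes to themselves, tails to the cycle entry).


-- ===== PORT A =====
-- termination helper for the while-loops of both ports (the visited/on-path set only grows
-- inside the dict's key set, so the number of unvisited keys strictly decreases)
lemma countP_not_mem_add_lt (l : List String) (V : PySem.Set String) (x : String)
    (hx : x ∈ l) (hnx : x ∉ V) :
    l.countP (fun k => decide (k ∉ PySem.Set.add V x)) < l.countP (fun k => decide (k ∉ V)) := by
  induction l with
  | nil => simp at hx
  | cons a t ih =>
    rw [List.countP_cons, List.countP_cons]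
    rcases List.mem_cons.1 hx with ha | hm
    · have h1 : a ∈ PySem.Set.add V x := (PySem.Set.mem_add V x a).2 (Or.inr ha.symm)
      have h2 : a ∉ V := ha ▸ hnx
      have hle : t.countP (fun k => decide (k ∉ PySem.Set.add V x)) ≤
          t.countP (fun k => decide (k ∉ V)) := by
        apply List.countP_mono_left
        intro k _ hk
        simp only [decide_eq_true_eq] at hk ⊢
        exact fun hkV => hk ((PySem.Set.mem_add V x k).2 (Or.inl hkV))
      have e1 : (if decide (a ∉ PySem.Set.add V x) = true then 1 else 0) = 0 := by simp [h1]
      have e2 : (if decide (a ∉ V) = true then 1 else 0) = 1 := by simp [h2]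
      rw [e1, e2]; omega
    · have h2 : (if decide (a ∉ PySem.Set.add V x) = true then 1 else 0) ≤
          (if decide (a ∉ V) = true then 1 else 0) := by
        split_ifs with g1 g2 g2 <;> try omega
        simp only [decide_eq_true_eq] at g1 g2
        exact absurd ((PySem.Set.mem_add V x a).2 (Or.inl (not_not.1 g2))) g1
      have := ih hm
      omega

-- the 'while final in redirect_map' loop of A (visited-set cycle guard); exact step for step
def chaseA (d : PySem.Dict String String) (visited : PySem.Set String) (final : String) : String :=
  if hc : d.contains final = true then
    if PySem.Set.contains visited final = true then final   -- cycle guard: break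
    else chaseA d (PySem.Set.add visited final) (d.getD final "")
  else final
termination_by d.keys.countP (fun k => decide (k ∉ visited))
decreasing_by
  exact countP_not_mem_add_lt d.keys visited final
    ((PySem.Dict.contains_iff_mem_keys _ _).1 hc)
    (fun hm => ‹¬PySem.Set.contains visited final = true› ((PySem.Set.contains_iff _ _).2 hm))

def flatten_chains_py (redirect_map : List (String × String)) : List (String × String) :=
  let d := PySem.Dict.ofList redirect_map
  (d.items.foldl
    (fun (fl : PySem.Dict String String) p =>
      fl.insert p.1 (chaseA d (PySem.Set.add PySem.Set.empty p.1) p.2))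
    PySem.Dict.empty).items

-- ===== PORT B =====
-- the 'while cur in redirect_map and cur not in memo and cur not in on_path' walk of B
def walkB (d : PySem.Dict String String) (memo : PySem.Dict String String)
    (path : List String) (onPath : PySem.Set String) (cur : String) :
    List String × PySem.Set String × String :=
  if h : d.contains cur = true ∧ memo.contains cur = false ∧
      PySem.Set.contains onPath cur = false then
    walkB d memo (path ++ [cur]) (PySem.Set.add onPath cur) (d.getD cur "")
  else (path, onPath, cur)
termination_by d.keys.countP (fun k => decide (k ∉ onPath))
decreasing_by
  exact countP_not_mem_add_lt d.keys onPath cur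
    ((PySem.Dict.contains_iff_mem_keys _ _).1 h.1)
    (fun hm => by rw [(PySem.Set.contains_iff _ _).2 hm] at h; simp at h)

-- one iteration of B's outer 'for start in redirect_map' loop
def stepB (d : PySem.Dict String String) (memo : PySem.Dict String String)
    (start : String) : PySem.Dict String String :=
  if memo.contains start = true then memo
  else
    match walkB d memo [] PySem.Set.empty start with
    | (path, onPath, cur) =>
      if PySem.Set.contains onPath cur = true then
        -- cycle: path.index(cur) always succeeds here (cur ∈ on_path = path)
        let i : Nat := (PySem.List.index? path cur).getD 0
        let memo₁ := (PySem.List.slice path none (some (i : Int))).foldl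
          (fun m node => m.insert node cur) memo
        (PySem.List.slice path (some (i : Int)) none).foldl
          (fun m node => m.insert node node) memo₁
      else
        let fin := memo.getD cur cur   -- memo.get(cur, cur)
        path.foldl (fun m node => m.insert node fin) memo

def flatten_chains_py_alt (redirect_map : List (String × String)) : List (String × String) :=
  let d := PySem.Dict.ofList redirect_map
  let memo := d.keys.foldl (fun m s => stepB d m s) PySem.Dict.empty
  -- {source: memo[source] for source in redirect_map}; memo[source] never misses here
  (d.keys.foldl
    (fun (out : PySem.Dict String String) s => out.insert s (memo.getD s ""))
    PySem.Dict.empty).items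

-- ===== PRECONDITION & SPEC =====
def Spec_flatten_chains_py (redirect_map : List (String × String)) (out : List (String × String)) : Prop := out = flatten_chains_py_alt redirect_map
instance (redirect_map : List (String × String)) (out : List (String × String)) : Decidable (Spec_flatten_chains_py redirect_map out) := by unfold Spec_flatten_chains_py; infer_instance

-- ===== CLAIM (what is proved, stated in full; the proofs are below) =====
def Claim_equal_flatten_chains_py : Prop := ∀ (redirect_map : List (String × String)), Dom_flatten_chains_py redirect_map → Spec_flatten_chains_py redirect_map (flatten_chains_py redirect_map)

-- ===== LEMMAS AND PROOFS =====

lemma set_add_empty (s : String) : PySem.Set.add PySem.Set.empty s = [s] := rfl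

def chaseF (d : PySem.Dict String String) (s : String) : String :=
  chaseA d (PySem.Set.add PySem.Set.empty s) (d.getD s "")

lemma chase_stop_nokey (d : PySem.Dict String String) (V : PySem.Set String) (c : String)
    (hc : d.contains c = false) : chaseA d V c = c := by
  rw [chaseA, dif_neg (by simp [hc])]

lemma chase_stop_mem (d : PySem.Dict String String) (V : PySem.Set String) (c : String)
    (hm : c ∈ V) : chaseA d V c = c := by
  rw [chaseA]
  split
  · rw [if_pos ((PySem.Set.contains_iff _ _).2 hm)]
  · rfl

lemma chase_step (d : PySem.Dict String String) (V : PySem.Set String) (c : String)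
    (hc : d.contains c = true) (hm : c ∉ V) :
    chaseA d V c = chaseA d (PySem.Set.add V c) (d.getD c "") := by
  rw [chaseA, dif_pos hc, if_neg (fun h => hm ((PySem.Set.contains_iff _ _).1 h))]

def Linked (d : PySem.Dict String String) : List String → String → Prop
  | [], _ => True
  | q :: rest, cur => d.contains q = true ∧ d.getD q "" = rest.headD cur ∧ Linked d rest cur

lemma linked_append_right (d : PySem.Dict String String) :
    ∀ (a b : List String) (cur : String), Linked d (a ++ b) cur → Linked d b cur := by
  intro a
  induction a with
  | nil => intro b cur h; exact h
  | cons q t ih => intro b cur h; exact ih b cur h.2.2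

lemma linked_split_left (d : PySem.Dict String String) :
    ∀ (a b : List String) (cur : String), Linked d (a ++ b) cur → Linked d a (b.headD cur) := by
  intro a
  induction a with
  | nil => intro b cur _; trivial
  | cons q t ih =>
    intro b cur h
    refine ⟨h.1, ?_, ih b cur h.2.2⟩
    rcases t with _ | ⟨u, t'⟩
    · simpa using h.2.1
    · simpa using h.2.1

lemma linked_append_singleton (d : PySem.Dict String String) :
    ∀ (qs : List String) (cur : String), Linked d qs cur → d.contains cur = true →
      Linked d (qs ++ [cur]) (d.getD cur "") := by
  intro qs
  induction qs with
  | nil => intro cur _ hc; exact ⟨hc, by simp, trivial⟩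
  | cons q t ih =>
    intro cur h hc
    refine ⟨h.1, ?_, ih cur h.2.2 hc⟩
    rcases t with _ | ⟨u, t'⟩
    · simpa using h.2.1
    · simpa using h.2.1

lemma linked_mem_next (d : PySem.Dict String String) :
    ∀ (qs : List String) (cur : String), Linked d qs cur → ∀ x ∈ qs,
      d.getD x "" ∈ qs ∨ d.getD x "" = cur := by
  intro qs
  induction qs with
  | nil => intro cur _ x hx; simp at hx
  | cons q t ih =>
    intro cur h x hx
    rcases List.mem_cons.1 hx with rfl | hm
    · rcases t with _ | ⟨u, t'⟩
      · right; simpa using h.2.1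
      · left; rw [h.2.1]; simp
    · rcases ih cur h.2.2 x hm with h' | h'
      · left; exact List.mem_cons_of_mem _ h'
      · right; exact h'

lemma chase_travel (d : PySem.Dict String String) :
    ∀ (qs : List String) (V : PySem.Set String) (cur : String),
      Linked d qs cur → qs.Nodup → (∀ q ∈ qs, q ∉ V) →
      chaseA d V (qs.headD cur) = chaseA d (V ++ qs) cur := by
  intro qs
  induction qs with
  | nil => intro V cur _ _ _; simp
  | cons q t ih =>
    intro V cur hlk hnd hdis
    have hq : q ∉ V := hdis q (List.mem_cons_self ..)
    have step := chase_step d V q hlk.1 hq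
    rw [List.headD_cons, step, PySem.Set.add_of_not_mem hq, hlk.2.1]
    have := ih (V ++ [q]) cur hlk.2.2 (List.Nodup.of_cons hnd) ?_
    · rw [this, List.append_assoc]; rfl
    · intro r hr
      rw [List.mem_append]
      rintro (h | h)
      · exact hdis r (List.mem_cons_of_mem _ hr) h
      · simp at h
        subst h
        exact (List.nodup_cons.1 hnd).1 hr
lemma chase_irrel (d : PySem.Dict String String) (M : String → Prop)
    (hcl : ∀ x, M x → d.contains (d.getD x "") = true → M (d.getD x "")) :
    ∀ (n : Nat) (V V' : PySem.Set String) (c : String),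
      d.keys.countP (fun k => decide (k ∉ V)) = n → (M c ∨ d.contains c = false) →
      (∀ x, M x → (x ∈ V ↔ x ∈ V')) → chaseA d V c = chaseA d V' c := by
  intro n
  induction n using Nat.strong_induction_on with
  | _ n ih =>
    intro V V' c hn hMor hVV'
    conv_lhs => rw [chaseA]
    conv_rhs => rw [chaseA]
    by_cases hc : d.contains c = true
    · have hM : M c := by
        rcases hMor with h | h
        · exact h
        · rw [hc] at h; exact absurd h (by simp)
      rw [dif_pos hc, dif_pos hc]
      have hmem : PySem.Set.contains V c = PySem.Set.contains V' c := by
        rcases h1 : PySem.Set.contains V c with _ | _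
        · rcases h2 : PySem.Set.contains V' c with _ | _
          · rfl
          · exfalso
            have := (hVV' c hM).2 ((PySem.Set.contains_iff _ _).1 h2)
            rw [(PySem.Set.contains_iff _ _).2 this] at h1; exact absurd h1 (by simp)
        · rw [(PySem.Set.contains_iff _ _).2 ((hVV' c hM).1 ((PySem.Set.contains_iff _ _).1 h1))]
      by_cases hv : PySem.Set.contains V c = true
      · rw [if_pos hv, if_pos (hmem ▸ hv)]
      · rw [if_neg hv, if_neg (fun h => hv (hmem ▸ h))]
        have hcnV : c ∉ V := fun hm => hv ((PySem.Set.contains_iff _ _).2 hm)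
        refine ih _ (hn ▸ countP_not_mem_add_lt d.keys V c
          ((PySem.Dict.contains_iff_mem_keys _ _).1 hc) hcnV) _ _ _ rfl ?_ ?_
        · rcases hnext : d.contains (d.getD c "") with _ | _
          · exact Or.inr rfl
          · exact Or.inl (hcl c hM hnext)
        intro x hMx
        rw [PySem.Set.mem_add, PySem.Set.mem_add]
        exact or_congr (hVV' x hMx) Iff.rfl
    · rw [dif_neg hc, dif_neg hc]

lemma getD_default_irrel (m : PySem.Dict String String) (k : String) (a b : String)
    (h : m.contains k = true) : m.getD k a = m.getD k b := by
  rw [PySem.Dict.getD_eq_get?_getD, PySem.Dict.getD_eq_get?_getD]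
  rw [PySem.Dict.contains_eq_isSome_get?] at h
  rcases hg : m.get? k with _ | v
  · rw [hg] at h; simp at h
  · rfl

-- nodes on the cycle resolve to themselves
lemma chaseF_cycle_self (d : PySem.Dict String String) (pre suf : List String) (c' : String)
    (hnd : (pre ++ c' :: suf).Nodup) (hlk : Linked d (pre ++ c' :: suf) c') :
    ∀ node ∈ c' :: suf, chaseF d node = node := by
  intro node hnode
  obtain ⟨l1, l2, hsplit⟩ := List.append_of_mem hnode
  have hp' : pre ++ c' :: suf = (pre ++ l1) ++ node :: l2 := by rw [hsplit]; simp
  have hndp := hp' ▸ hnd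
  have hlkp := hp' ▸ hlk
  have hlk1 : Linked d (node :: l2) c' := linked_append_right d (pre ++ l1) _ c' hlkp
  have hnode_key : d.contains node = true := hlk1.1
  have hl2nd : (node :: l2).Nodup := (List.nodup_append.1 hndp).2.1
  -- first travel: through l2
  have t1 : chaseA d [node] ((l2).headD c') = chaseA d ([node] ++ l2) c' := by
    refine chase_travel d l2 [node] c' hlk1.2.2 (List.Nodup.of_cons hl2nd) ?_
    intro q hq hq'
    simp at hq'
    subst hq'
    exact (List.nodup_cons.1 hl2nd).1 hq
  -- c' = l1.headD node
  have hc'head : l1.headD node = c' := by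
    rcases l1 with _ | ⟨y, l1'⟩
    · simpa using congrArg (fun l => l.headD node) hsplit.symm
    · simpa using congrArg (fun l => l.headD node) hsplit.symm
  -- Linked d l1 node
  have hlk2 : Linked d l1 node := by
    have := linked_split_left d l1 (node :: l2) c'
      (hsplit ▸ linked_append_right d pre (c' :: suf) c' hlk)
    simpa using this
  have hl1nd : l1.Nodup := by
    have := (List.nodup_append.1 (hsplit ▸ (List.nodup_append.1 hnd).2.1 : (l1 ++ node :: l2).Nodup))
    exact this.1
  have hdisj : ∀ q ∈ l1, q ∉ [node] ++ l2 := by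
    have hnd2 : (l1 ++ node :: l2).Nodup := hsplit ▸ (List.nodup_append.1 hnd).2.1
    intro q hq hq'
    rcases List.mem_append.1 hq' with h | h
    · simp at h; subst h
      exact (List.disjoint_of_nodup_append hnd2) hq (List.mem_cons_self ..)
    · exact (List.disjoint_of_nodup_append hnd2) hq (List.mem_cons_of_mem _ h)
  have t2 : chaseA d ([node] ++ l2) (l1.headD node) = chaseA d (([node] ++ l2) ++ l1) node :=
    chase_travel d l1 ([node] ++ l2) node hlk2 hl1nd hdisj
  have hfin : chaseA d (([node] ++ l2) ++ l1) node = node :=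
    chase_stop_mem d _ node (by simp)
  have hstart : d.getD node "" = l2.headD c' := hlk1.2.1
  show chaseA d (PySem.Set.add PySem.Set.empty node) (d.getD node "") = node
  rw [set_add_empty, hstart, t1, ← hc'head, t2, hfin]

-- nodes before the cycle entry resolve to the entry point c'
lemma chaseF_cycle_tail (d : PySem.Dict String String) (pre suf : List String) (c' : String)
    (hnd : (pre ++ c' :: suf).Nodup) (hlk : Linked d (pre ++ c' :: suf) c') :
    ∀ node ∈ pre, chaseF d node = c' := by
  intro node hnode
  obtain ⟨m1, m2, hsplit⟩ := List.append_of_mem hnode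
  have hp' : pre ++ c' :: suf = m1 ++ node :: (m2 ++ c' :: suf) := by rw [hsplit]; simp
  have hlk1 : Linked d (node :: (m2 ++ c' :: suf)) c' :=
    linked_append_right d m1 _ c' (hp' ▸ hlk)
  have hndp := hp' ▸ hnd
  have hnd1 : (node :: (m2 ++ c' :: suf)).Nodup := (List.nodup_append.1 hndp).2.1
  have t1 : chaseA d [node] ((m2 ++ c' :: suf).headD c') =
      chaseA d ([node] ++ (m2 ++ c' :: suf)) c' := by
    refine chase_travel d _ [node] c' hlk1.2.2 (List.Nodup.of_cons hnd1) ?_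
    intro q hq hq'
    simp at hq'
    subst hq'
    exact (List.nodup_cons.1 hnd1).1 hq
  have hfin : chaseA d ([node] ++ (m2 ++ c' :: suf)) c' = c' :=
    chase_stop_mem d _ c' (by simp)
  show chaseA d (PySem.Set.add PySem.Set.empty node) (d.getD node "") = c'
  rw [set_add_empty, hlk1.2.1, t1, hfin]

-- the walk left the path: the final target of every path node is fin = memo.get(cur, cur)
lemma chaseF_exit (d : PySem.Dict String String) (memo : PySem.Dict String String)
    (p' : List String) (c' : String)
    (hnd : p'.Nodup) (hlk : Linked d p' c')
    (hnotmemo : ∀ q ∈ p', memo.contains q = false)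
    (hmemokeys : ∀ x, memo.contains x = true → d.contains x = true)
    (hmemocl : ∀ x, memo.contains x = true → d.contains (d.getD x "") = true →
      memo.contains (d.getD x "") = true)
    (hmemoval : ∀ x, memo.contains x = true → memo.getD x "" = chaseF d x)
    (hcase : memo.contains c' = true ∨ d.contains c' = false) :
    ∀ node ∈ p', chaseF d node = memo.getD c' c' := by
  intro node hnode
  obtain ⟨m1, m2, hsplit⟩ := List.append_of_mem hnode
  have hlk1 : Linked d (node :: m2) c' := linked_append_right d m1 _ c' (hsplit ▸ hlk)
  have hnd1 : (node :: m2).Nodup := (List.nodup_append.1 (hsplit ▸ hnd)).2.1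
  have t1 : chaseA d [node] (m2.headD c') = chaseA d ([node] ++ m2) c' := by
    refine chase_travel d m2 [node] c' hlk1.2.2 (List.Nodup.of_cons hnd1) ?_
    intro q hq hq'
    simp at hq'
    subst hq'
    exact (List.nodup_cons.1 hnd1).1 hq
  have hbase : chaseF d node = chaseA d ([node] ++ m2) c' := by
    show chaseA d (PySem.Set.add PySem.Set.empty node) (d.getD node "") = _
    rw [set_add_empty, hlk1.2.1, t1]
  rcases hcase with hmc | hnk
  · -- c' already memoised: shrink the visited set to ∅, then one step gives chaseF c'
    have hirr : chaseA d ([node] ++ m2) c' = chaseA d [] c' := by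
      refine chase_irrel d (fun x => memo.contains x = true) hmemocl _ _ _ c' rfl (Or.inl hmc) ?_
      intro x hMx
      constructor
      · intro hx
        exfalso
        have hxp : x ∈ p' := by
          rw [hsplit]
          rcases List.mem_append.1 hx with h | h
        

          · simp at h; subst h; exact List.mem_append.2 (Or.inr (List.mem_cons_self ..))
          · exact List.mem_append.2 (Or.inr (List.mem_cons_of_mem _ h))
        rw [hnotmemo x hxp] at hMx; exact absurd hMx (by simp)
      · intro hx; simp at hx
    have hckey : d.contains c' = true := hmemokeys c' hmc
    have hstep : chaseA d [] c' = chaseF d c' := by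
      rw [chase_step d [] c' hckey (by simp)]; rfl
    rw [hbase, hirr, hstep, ← hmemoval c' hmc]
    exact getD_default_irrel memo c' "" c' hmc
  · -- c' is not a key: the chase stops at c', and memo cannot contain c'
    have hnc : memo.contains c' = false := by
      rcases h : memo.contains c' with _ | _
      · rfl
      · rw [hmemokeys c' h] at hnk; exact absurd hnk (by simp)
    rw [hbase, chase_stop_nokey d _ c' hnk, PySem.Dict.getD_of_not_contains memo c' hnc]
lemma foldl_insert_getD (g : String → String) :
    ∀ (l : List String) (m : PySem.Dict String String) (x : String),
      (l.foldl (fun m node => m.insert node (g node)) m).getD x "" =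
        if x ∈ l then g x else m.getD x "" := by
  intro l
  induction l with
  | nil => intro m x; simp
  | cons a t ih =>
    intro m x
    rw [List.foldl_cons, ih]
    by_cases hx : x ∈ t
    · simp [hx]
    · rw [if_neg hx, PySem.Dict.getD_insert]
      by_cases hxa : x = a
      · subst hxa; simp
      · simp [hxa, hx]

lemma foldl_insert_contains (g : String → String) :
    ∀ (l : List String) (m : PySem.Dict String String) (x : String),
      (l.foldl (fun m node => m.insert node (g node)) m).contains x = true ↔
        x ∈ l ∨ m.contains x = true := by
  intro l
  induction l with
  | nil => intro m x; simp
  | cons a t ih =>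
    intro m x
    rw [List.foldl_cons, ih, PySem.Dict.contains_insert]
    constructor
    · rintro (h | h)
      · exact Or.inl (List.mem_cons_of_mem _ h)
      · rcases (Bool.or_eq_true _ _ ▸ h : _ = true ∨ _ = true) with h | h
        · simp at h; subst h; exact Or.inl (List.mem_cons_self ..)
        · exact Or.inr h
    · rintro (h | h)
      · rcases List.mem_cons.1 h with rfl | h
        · exact Or.inr (by simp)
        · exact Or.inl h
      · exact Or.inr (by simp [h])

lemma foldl_insert_nodup (g : String → String) (l : List String)
    (m : PySem.Dict String String) (h : m.keys.Nodup) :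
    (l.foldl (fun m node => m.insert node (g node)) m).keys.Nodup := by
  induction l generalizing m with
  | nil => exact h
  | cons a t ih => exact ih _ (PySem.Dict.nodup_keys_insert _ _ _ h)

lemma walkB_spec (d memo : PySem.Dict String String) :
    ∀ (n : Nat) (path : List String) (cur : String),
      d.keys.countP (fun k => decide (k ∉ path)) = n →
      path.Nodup → Linked d path cur →
      (∀ q ∈ path, d.contains q = true ∧ memo.contains q = false) →
      ∃ p' c', walkB d memo path path cur = (p', p', c') ∧
        path <+: p' ∧ p'.Nodup ∧ Linked d p' c' ∧
        (∀ q ∈ p', d.contains q = true ∧ memo.contains q = false) ∧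
        ¬(d.contains c' = true ∧ memo.contains c' = false ∧ c' ∉ p') ∧
        (d.contains cur = true → memo.contains cur = false → cur ∉ path → cur ∈ p') := by
  intro n
  induction n using Nat.strong_induction_on with
  | _ n ih =>
    intro path cur hn hnd hlk hprops
    rw [walkB]
    by_cases hg : d.contains cur = true ∧ memo.contains cur = false ∧
        PySem.Set.contains path cur = false
    · rw [dif_pos hg]
      have hcnp : cur ∉ path := fun hm => by
        rw [(PySem.Set.contains_iff _ _).2 hm] at hg
        exact absurd hg.2.2 (by simp)
      have hadd : PySem.Set.add path cur = path ++ [cur] := PySem.Set.add_of_not_mem hcnp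
      have hlt : d.keys.countP (fun k => decide (k ∉ path ++ [cur])) < n := by
        have := countP_not_mem_add_lt d.keys path cur
          ((PySem.Dict.contains_iff_mem_keys _ _).1 hg.1) hcnp
        rw [hadd] at this
        exact hn ▸ this
      have hnd' : (path ++ [cur]).Nodup := by
        rw [List.nodup_append]
        refine ⟨hnd, List.nodup_singleton _, ?_⟩
        intro a ha b hb
        simp only [List.mem_singleton] at hb
        subst hb
        exact fun h => hcnp (h ▸ ha)
      have hlk' : Linked d (path ++ [cur]) (d.getD cur "") :=
        linked_append_singleton d path cur hlk hg.1
      have hprops' : ∀ q ∈ path ++ [cur], d.contains q = true ∧ memo.contains q = false := by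
        intro q hq
        rcases List.mem_append.1 hq with h | h
        · exact hprops q h
        · simp at h; subst h; exact ⟨hg.1, hg.2.1⟩
      obtain ⟨p', c', heq, hpre, hnd'', hlk'', hprops'', hstop, _⟩ :=
        ih _ hlt (path ++ [cur]) (d.getD cur "") rfl hnd' hlk' hprops'
      rw [hadd]
      refine ⟨p', c', heq, ?_, hnd'', hlk'', hprops'', hstop, ?_⟩
      · exact List.IsPrefix.trans (List.prefix_append path [cur]) hpre
      · intro _ _ _
        exact hpre.subset (List.mem_append.2 (Or.inr (List.mem_cons_self ..)))
    · rw [dif_neg hg]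
      refine ⟨path, cur, rfl, List.prefix_refl _, hnd, hlk, hprops, ?_, ?_⟩
      · rintro ⟨h1, h2, h3⟩
        exact hg ⟨h1, h2, by
          rcases h : PySem.Set.contains path cur with _ | _
          · rfl
          · exact absurd ((PySem.Set.contains_iff _ _).1 h) h3⟩
      · intro h1 h2 h3
        exact absurd ⟨h1, h2, by
          rcases h : PySem.Set.contains path cur with _ | _
          · rfl
          · exact absurd ((PySem.Set.contains_iff _ _).1 h) h3⟩ hg

-- the memo invariant of Bs outer loop of B's outer loop
def MemoInv (d memo : PySem.Dict String String) : Prop :=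
  memo.keys.Nodup ∧
  (∀ x, memo.contains x = true → d.contains x = true) ∧
  (∀ x, memo.contains x = true → d.contains (d.getD x "") = true →
    memo.contains (d.getD x "") = true) ∧
  (∀ x, memo.contains x = true → memo.getD x "" = chaseF d x)

lemma stepB_spec (d memo : PySem.Dict String String) (s : String)
    (hs : s ∈ d.keys) (hInv : MemoInv d memo) :
    MemoInv d (stepB d memo s) ∧ (stepB d memo s).contains s = true ∧
      (∀ x, memo.contains x = true → (stepB d memo s).contains x = true) := by
  rw [stepB]
  by_cases hms : memo.contains s = true
  · rw [if_pos hms]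
    exact ⟨hInv, hms, fun x h => h⟩
  · rw [if_neg hms]
    have hmsf : memo.contains s = false := by
      rcases h : memo.contains s with _ | _
      · rfl
      · exact absurd h hms
    obtain ⟨p', c', heq, _, hnd, hlk, hprops, hstop, hins⟩ :=
      walkB_spec d memo (d.keys.countP (fun k => decide (k ∉ ([] : List String)))) [] s
        rfl (List.nodup_nil) trivial (by intro q hq; simp at hq)
    have heq' : walkB d memo [] PySem.Set.empty s = (p', p', c') := heq
    rw [heq']
    dsimp only
    have hsp : s ∈ p' := hins ((PySem.Dict.contains_iff_mem_keys _ _).2 hs) hmsf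
      (List.not_mem_nil)
    have hmemC : ∀ x ∈ p', memo.contains x = false := fun x hx => (hprops x hx).2
    have hkeysC : ∀ x ∈ p', d.contains x = true := fun x hx => (hprops x hx).1
    by_cases hcyc : PySem.Set.contains p' c' = true
    · -- cycle branch
      rw [if_pos hcyc]
      have hc'p : c' ∈ p' := (PySem.Set.contains_iff _ _).1 hcyc
      obtain ⟨i, hidx⟩ := (PySem.List.index?_isSome_iff p' c').2 hc'p |> Option.isSome_iff_exists.1
      obtain ⟨pre, suf, hsplit, hlen, _⟩ := (PySem.List.index?_eq_some_iff p' c' i).1 hidx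
      rw [hidx]
      have htake : PySem.List.slice p' none (some ((Option.some i).getD 0 : Nat)) = pre := by
        rw [Option.getD_some, PySem.List.slice_to_natCast, hsplit, ← hlen, List.take_left]
      have hdrop : PySem.List.slice p' (some ((Option.some i).getD 0 : Nat)) none = c' :: suf := by
        rw [Option.getD_some, PySem.List.slice_from_natCast, hsplit, ← hlen, List.drop_left]
      rw [htake, hdrop]
      have hndp := hsplit ▸ hnd
      have hlkp : Linked d (pre ++ c' :: suf) c' := hsplit ▸ hlk
      have hdisj := List.disjoint_of_nodup_append hndp
      -- membership/value description of the final memo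
      set M1 := pre.foldl (fun m node => m.insert node c') memo with hM1
      set M2 := (c' :: suf).foldl (fun m node => m.insert node node) M1 with hM2
      have hcont : ∀ x, M2.contains x = true ↔ x ∈ p' ∨ memo.contains x = true := by
        intro x
        rw [hM2, foldl_insert_contains, hM1, foldl_insert_contains, hsplit]
        constructor
        · rintro (h | h | h)
          · exact Or.inl (List.mem_append.2 (Or.inr h))
          · exact Or.inl (List.mem_append.2 (Or.inl h))
          · exact Or.inr h
        · rintro (h | h)
          · rcases List.mem_append.1 h with h | h
            · exact Or.inr (Or.inl h)
            · exact Or.inl h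
          · exact Or.inr (Or.inr h)
      have hval : ∀ x, M2.getD x "" =
          if x ∈ c' :: suf then x else if x ∈ pre then c' else memo.getD x "" := by
        intro x
        rw [hM2, foldl_insert_getD, hM1, foldl_insert_getD]
      refine ⟨⟨?_, ?_, ?_, ?_⟩, ?_, ?_⟩
      · exact foldl_insert_nodup _ _ _ (foldl_insert_nodup _ _ _ hInv.1)
      · intro x hx
        rcases (hcont x).1 hx with h | h
        · exact hkeysC x h
        · exact hInv.2.1 x h
      · intro x hx hdx
        rcases (hcont x).1 hx with h | h
        · rcases linked_mem_next d p' c' hlk x h with h' | h'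
          · exact (hcont _).2 (Or.inl h')
          · exact (hcont _).2 (Or.inl (h' ▸ hc'p))
        · rcases hnext : memo.contains (d.getD x "") with _ | _
          · -- next not in old memo: by old closure it must be, contradiction unless… use closure
            have := hInv.2.2.1 x h hdx
            rw [hnext] at this; exact absurd this (by simp)
          · exact (hcont _).2 (Or.inr hnext)
      · intro x hx
        rw [hval]
        by_cases h1 : x ∈ c' :: suf
        · rw [if_pos h1]
          exact (chaseF_cycle_self d pre suf c' hndp hlkp x h1).symm
        · rw [if_neg h1]
          by_cases h2 : x ∈ pre
          · rw [if_pos h2]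
            exact (chaseF_cycle_tail d pre suf c' hndp hlkp x h2).symm
          · rw [if_neg h2]
            have hxold : memo.contains x = true := by
              rcases (hcont x).1 hx with h | h
              · exfalso
                rcases List.mem_append.1 (hsplit ▸ h) with h' | h'
                · exact h2 h'
                · exact h1 h'
              · exact h
            exact hInv.2.2.2 x hxold
      · refine (hcont s).2 (Or.inl hsp)
      · intro x hx
        exact (hcont x).2 (Or.inr hx)
    · -- the walk left the path (non-key target or already memoised node)
      rw [if_neg hcyc]
      have hc'np : c' ∉ p' := fun hm => hcyc ((PySem.Set.contains_iff _ _).2 hm)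
      have hcase : memo.contains c' = true ∨ d.contains c' = false := by
        rcases h1 : d.contains c' with _ | _
        · exact Or.inr rfl
        · rcases h2 : memo.contains c' with _ | _
          · exact absurd ⟨h1, h2, hc'np⟩ hstop
          · exact Or.inl rfl
      have hfinval := chaseF_exit d memo p' c' hnd hlk hmemC hInv.2.1 hInv.2.2.1
        hInv.2.2.2 hcase
      set fin := memo.getD c' c' with hfin
      set M := p'.foldl (fun m node => m.insert node fin) memo with hM
      have hcont : ∀ x, M.contains x = true ↔ x ∈ p' ∨ memo.contains x = true := by
        intro x; rw [hM, foldl_insert_contains]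
      have hval : ∀ x, M.getD x "" = if x ∈ p' then fin else memo.getD x "" := by
        intro x; rw [hM, foldl_insert_getD]
      refine ⟨⟨?_, ?_, ?_, ?_⟩, ?_, ?_⟩
      · exact foldl_insert_nodup _ _ _ hInv.1
      · intro x hx
        rcases (hcont x).1 hx with h | h
        · exact hkeysC x h
        · exact hInv.2.1 x h
      · intro x hx hdx
        rcases (hcont x).1 hx with h | h
        · rcases linked_mem_next d p' c' hlk x h with h' | h'
          · exact (hcont _).2 (Or.inl h')
          · rcases hcase with hc | hc
            · exact (hcont _).2 (Or.inr (h' ▸ hc))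
            · rw [h', hc] at hdx; exact absurd hdx (by simp)
        · rcases hnext : memo.contains (d.getD x "") with _ | _
          · have := hInv.2.2.1 x h hdx
            rw [hnext] at this; exact absurd this (by simp)
          · exact (hcont _).2 (Or.inr hnext)
      · intro x hx
        rw [hval]
        by_cases h1 : x ∈ p'
        · rw [if_pos h1]
          exact (hfinval x h1).symm
        · rw [if_neg h1]
          have hxold : memo.contains x = true := by
            rcases (hcont x).1 hx with h | h
            · exact absurd h h1
            · exact h
          exact hInv.2.2.2 x hxold
      · exact (hcont s).2 (Or.inl hsp)
      · intro x hx
        exact (hcont x).2 (Or.inr hx)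

lemma fold_stepB (d : PySem.Dict String String) :
    ∀ (ks : List String) (memo : PySem.Dict String String),
      (∀ k ∈ ks, k ∈ d.keys) → MemoInv d memo →
      MemoInv d (ks.foldl (fun m s => stepB d m s) memo) ∧
      (∀ x, memo.contains x = true →
        (ks.foldl (fun m s => stepB d m s) memo).contains x = true) ∧
      (∀ k ∈ ks, (ks.foldl (fun m s => stepB d m s) memo).contains k = true) := by
  intro ks
  induction ks with
  | nil => intro memo _ hInv; exact ⟨hInv, fun x h => h, by simp⟩
  | cons a t ih =>
    intro memo hks hInv
    obtain ⟨hInv1, hca, hmono1⟩ := stepB_spec d memo a (hks a (List.mem_cons_self ..)) hInv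
    obtain ⟨hInv2, hmono2, hall⟩ := ih (stepB d memo a)
      (fun k hk => hks k (List.mem_cons_of_mem _ hk)) hInv1
    rw [List.foldl_cons]
    refine ⟨hInv2, fun x hx => hmono2 x (hmono1 x hx), ?_⟩
    intro k hk
    rcases List.mem_cons.1 hk with rfl | hk'
    · exact hmono2 k hca
    · exact hall k hk'

lemma memoInv_empty (d : PySem.Dict String String) : MemoInv d PySem.Dict.empty := by
  refine ⟨?_, ?_, ?_, ?_⟩
  · exact PySem.Dict.nodup_keys_empty
  · intro x hx; rw [PySem.Dict.contains_empty] at hx; exact absurd hx (by simp)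
  · intro x hx; rw [PySem.Dict.contains_empty] at hx; exact absurd hx (by simp)
  · intro x hx; rw [PySem.Dict.contains_empty] at hx; exact absurd hx (by simp)


theorem flatten_main : ∀ (redirect_map : List (String × String)),
    flatten_chains_py redirect_map = flatten_chains_py_alt redirect_map := by
  intro rm
  simp only [flatten_chains_py, flatten_chains_py_alt]
  set d := PySem.Dict.ofList rm with hd
  have hndk : d.keys.Nodup := PySem.Dict.nodup_keys_ofList rm
  -- A's loop inserts each key once
  have hA : (d.items.foldl
      (fun (fl : PySem.Dict String String) p =>
        fl.insert p.1 (chaseA d (PySem.Set.add PySem.Set.empty p.1) p.2))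
      PySem.Dict.empty).items =
      PySem.Dict.empty.items ++ d.items.map
        (fun p => (p.1, chaseA d (PySem.Set.add PySem.Set.empty p.1) p.2)) := by
    refine PySem.Dict.items_foldl_insert_fresh d.items (fun p => p.1)
      (fun p => chaseA d (PySem.Set.add PySem.Set.empty p.1) p.2) PySem.Dict.empty
      (fun a _ => PySem.Dict.contains_empty _) ?_
    exact (show List.map (fun p : String × String => p.1) d.items = d.keys from rfl) ▸ hndk
  rw [hA]
  -- B's memo table
  set memoF := d.keys.foldl (fun m s => stepB d m s) PySem.Dict.empty with hmemoF
  obtain ⟨hInvF, _, hallF⟩ := fold_stepB d d.keys PySem.Dict.empty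
    (fun k hk => hk) (memoInv_empty d)
  have hB : (d.keys.foldl
      (fun (out : PySem.Dict String String) s => out.insert s (memoF.getD s ""))
      PySem.Dict.empty).items =
      PySem.Dict.empty.items ++ d.keys.map (fun s => (s, memoF.getD s "")) := by
    refine PySem.Dict.items_foldl_insert_fresh d.keys (fun s => s)
      (fun s => memoF.getD s "") PySem.Dict.empty
      (fun a _ => PySem.Dict.contains_empty _) ?_
    simpa using hndk
  rw [hB]
  rw [PySem.Dict.items_eq_map_keys d hndk "", List.map_map]
  have hempty : PySem.Dict.empty.items = ([] : List (String × String)) := rfl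
  rw [hempty]
  simp only [List.nil_append]
  refine List.map_congr_left ?_
  intro k hk
  show (k, chaseF d k) = (k, memoF.getD k "")
  have hck : memoF.contains k = true := hallF k hk
  rw [hInvF.2.2.2 k hck]

-- ===== VERDICT (by name: the statement is the Claim_ definition above) =====
theorem flatten_chains_py_spec : Claim_equal_flatten_chains_py := by
  intro redirect_map _
  unfold Spec_flatten_chains_py
  exact flatten_main redirect_map
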